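-- pv_equiv track=rewrite | github.com/pypi-data/pypi-mirror-101 | packages/fluffysnips/fluffysnips-0.0.3-py3-none-any.whl/fluffysnips/tablefix.py | split_from_codeblocks
-- ===== SOURCE A (Python) =====
-- from typing import Optional, List, Iterator, Tuple
--
-- def split_from_codeblocks(
--     lines: List[Tuple[int, str]]
-- ) -> Iterator[List[Tuple[int, str]]]:
--     last_idx = -1
--     current_block = []
--     for idx, line in lines:
--         if idx != last_idx + 1:
--             if current_block:
--                 yield current_block
--                 current_block = []
--         last_idx = idx
--         current_block.append((idx, line))
--     if current_block:
--         yield current_block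
-- ===== SOURCE B (Python) =====
-- from itertools import groupby
-- from typing import List, Iterator, Tuple
--
--
-- def split_from_codeblocks(
--     lines: List[Tuple[int, str]]
-- ) -> Iterator[List[Tuple[int, str]]]:
--     # key idx - position is constant exactly within a contiguous-index run
--     for _, run in groupby(enumerate(lines), key=lambda p: p[1][0] - p[0]):
--         yield [pair for _, pair in run]
-- ===== Notes on version B (the rewrite author's own statement) =====
-- stated objective: idiomatic
-- what changed: Replaces the last_idx/current_block accumulator loop by itertools.groupby over enumerate(lines) keyed by idx - position, which is constant exactly within each contiguous-index run; boundaries are implicit in the key change.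
import Mathlib
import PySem

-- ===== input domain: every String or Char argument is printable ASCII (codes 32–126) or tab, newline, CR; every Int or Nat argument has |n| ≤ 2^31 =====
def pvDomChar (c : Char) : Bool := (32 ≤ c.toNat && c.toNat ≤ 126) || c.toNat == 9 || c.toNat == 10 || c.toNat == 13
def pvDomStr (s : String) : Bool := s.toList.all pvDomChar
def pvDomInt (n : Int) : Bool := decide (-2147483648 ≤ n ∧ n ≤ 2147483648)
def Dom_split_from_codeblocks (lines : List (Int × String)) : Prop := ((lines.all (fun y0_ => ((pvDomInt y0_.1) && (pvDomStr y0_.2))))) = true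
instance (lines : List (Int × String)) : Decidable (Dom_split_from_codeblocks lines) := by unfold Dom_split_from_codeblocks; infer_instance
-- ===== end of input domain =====

-- B replaces A's last_idx/current_block accumulator loop by grouping on the key idx - position
-- (constant within each contiguous run), the itertools.groupby idiom; same cost, more idiomatic.

-- ===== PORT A =====
-- the generator loop of A: state = (last_idx, current_block); yields become list appends
def pvLoopA (last : Int) (cur : List (Int × String)) : List (Int × String) → List (List (Int × String))
  | [] => if cur = [] then [] else [cur]
  | (idx, line) :: rest =>
      if idx ≠ last + 1 then
        (if cur = [] then [] else [cur]) ++ pvLoopA idx [(idx, line)] rest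
      else
        pvLoopA idx (cur ++ [(idx, line)]) rest

def split_from_codeblocks (lines : List (Int × String)) : List (List (Int × String)) :=
  pvLoopA (-1) [] lines

-- ===== PORT B =====
-- enumerate(lines) with key p[1][0] - p[0]: pair each element with its key idx - position
def pvKeyed (i : Int) : List (Int × String) → List (Int × (Int × String))
  | [] => []
  | p :: rest => (p.1 - i, p) :: pvKeyed (i + 1) rest

-- groupby: take the run of the current key
def pvTakeRun (k : Int) : List (Int × (Int × String)) → List (Int × String) × List (Int × (Int × String))
  | [] => ([], [])
  | (k', p) :: rest =>
      if k' = k then ((pvTakeRun k rest).1.cons p, (pvTakeRun k rest).2)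
      else ([], (k', p) :: rest)

theorem pvTakeRun_len (k : Int) (l : List (Int × (Int × String))) :
    (pvTakeRun k l).2.length ≤ l.length := by
  induction l with
  | nil => simp [pvTakeRun]
  | cons x rest ih =>
      obtain ⟨k', p⟩ := x
      simp only [pvTakeRun]
      split
      · simpa using Nat.le_succ_of_le ih
      · simp

def pvGroups (l : List (Int × (Int × String))) : List (List (Int × String)) :=
  match l with
  | [] => []
  | (k, p) :: rest =>
      (p :: (pvTakeRun k rest).1) :: pvGroups (pvTakeRun k rest).2
  termination_by l.length
  decreasing_by exact Nat.lt_succ_of_le (pvTakeRun_len k rest)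

def split_from_codeblocks_alt (lines : List (Int × String)) : List (List (Int × String)) :=
  pvGroups (pvKeyed 0 lines)

-- ===== PRECONDITION & SPEC =====
def Spec_split_from_codeblocks (lines : List (Int × String)) (out : List (List (Int × String))) : Prop := out = split_from_codeblocks_alt lines
instance (lines : List (Int × String)) (out : List (List (Int × String))) : Decidable (Spec_split_from_codeblocks lines out) := by unfold Spec_split_from_codeblocks; infer_instance

-- ===== CLAIM (what is proved, stated in full; the proofs are below) =====
def Claim_equal_split_from_codeblocks : Prop := ∀ (lines : List (Int × String)), Dom_split_from_codeblocks lines → Spec_split_from_codeblocks lines (split_from_codeblocks lines)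

-- ===== LEMMAS AND PROOFS =====

theorem pvGroups_nil : pvGroups [] = [] := by rw [pvGroups]

theorem pvGroups_cons (k : Int) (p : Int × String) (rest : List (Int × (Int × String))) :
    pvGroups ((k, p) :: rest) = (p :: (pvTakeRun k rest).1) :: pvGroups (pvTakeRun k rest).2 := by
  rw [pvGroups]

-- inside a run: A's last_idx is k + i - 1, where k is the run's key and i the next position
theorem pvLoopA_eq_groups (lines : List (Int × String)) :
    ∀ (i k last : Int) (cur : List (Int × String)), last = k + i - 1 → cur ≠ [] →
      pvLoopA last cur lines =
        (cur ++ (pvTakeRun k (pvKeyed i lines)).1) :: pvGroups (pvTakeRun k (pvKeyed i lines)).2 := by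
  induction lines with
  | nil =>
      intro i k last cur _ hcur
      simp [pvLoopA, pvKeyed, pvTakeRun, pvGroups_nil, hcur]
  | cons p rest ih =>
      intro i k last cur hlast hcur
      obtain ⟨idx, line⟩ := p
      by_cases hk : idx - i = k
      · -- same key: the run continues, A's condition idx ≠ last + 1 is false
        simp only [pvLoopA, pvKeyed, pvTakeRun]
        rw [if_neg (by omega : ¬ idx ≠ last + 1), if_pos hk,
          ih (i + 1) k idx (cur ++ [(idx, line)]) (by omega) (by simp)]
        simp
      · -- key changes: A yields cur and starts a fresh block
        simp only [pvLoopA, pvKeyed, pvTakeRun]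
        rw [if_pos (by omega : idx ≠ last + 1), if_neg hcur, if_neg hk, pvGroups_cons,
          ih (i + 1) (idx - i) idx [(idx, line)] (by omega) (by simp)]
        simp

-- ===== VERDICT (by name: the statement is the Claim_ definition above) =====
theorem split_from_codeblocks_spec : Claim_equal_split_from_codeblocks := by
  intro lines _
  unfold Spec_split_from_codeblocks split_from_codeblocks split_from_codeblocks_alt
  cases lines with
  | nil => simp [pvLoopA, pvKeyed, pvGroups_nil]
  | cons p rest =>
      obtain ⟨idx, line⟩ := p
      simp only [pvKeyed, pvGroups_cons]
      -- with empty current_block A never yields at the head and just starts the block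
      have hstart : pvLoopA (-1) [] ((idx, line) :: rest) = pvLoopA idx [(idx, line)] rest := by
        simp only [pvLoopA]
        split <;> simp
      rw [hstart,
        pvLoopA_eq_groups rest (0 + 1) (idx - 0) idx [(idx, line)] (by omega) (by simp)]
      simp
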